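-- pv_equiv track=rewrite | github.com/XiaoSX/leetcode | titles_150/q174.py | cut_state
-- ===== SOURCE A (Python) =====
-- def cut_state(states):
--     N = len(states)
--
--     for i in range(N - 1):
--         if states[i] is None:
--             continue
--         m, p = states[i]
--         for j in range(i+1, N):
--             if states[j] is None:
--                 continue
--             n, q = states[j]
--             if p == q:
--                 if m <= n:
--                     states[j] = None
--                     continue
--                 else:
--                     states[i] = None
--                     break
--             elif p < q:
--                 if m - p <= n - q:
--                     states[j] = None
--                 continue
--             else:
--                 if n - q <= m - p:
--                     states[i] = None
--                     break
--                 else: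
--                     continue
--
--     return [x for x in states if x is not None]
-- ===== SOURCE B (Python) =====
-- def cut_state(states):
--     # B: group by p in one dict pass (keep per-p lex-min (m-p, index)), then sweep the
--     # sorted distinct p's with a running min of d = m-p to keep the Pareto-minimal states.
--     # Note: unlike A, B does not mutate the input list; equivalence is about the return value.
--     best = {}
--     for i, s in enumerate(states):
--         if s is None:
--             continue
--         m, p = s
--         d = m - p
--         if p not in best or d < best[p][0]:
--             best[p] = (d, i)
--     keep = set()
--     cur = None
--     for p in sorted(best):
--         d, i = best[p]
--         if cur is None or d < cur:
--             keep.add(i)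
--             cur = d
--     return [s for i, s in enumerate(states) if i in keep]
-- ===== Notes on version B (the rewrite author's own statement) =====
-- stated objective: alternative
-- what changed: A prunes dominated states by an in-place quadratic pairwise elimination over the list; B makes one dict pass keeping, per price p, the lexicographically least (m-p, index), then sweeps the sorted distinct p's with a running minimum of m-p to keep exactly the Pareto-minimal states (and, unlike A, never mutates its argument).
import Mathlib
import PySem

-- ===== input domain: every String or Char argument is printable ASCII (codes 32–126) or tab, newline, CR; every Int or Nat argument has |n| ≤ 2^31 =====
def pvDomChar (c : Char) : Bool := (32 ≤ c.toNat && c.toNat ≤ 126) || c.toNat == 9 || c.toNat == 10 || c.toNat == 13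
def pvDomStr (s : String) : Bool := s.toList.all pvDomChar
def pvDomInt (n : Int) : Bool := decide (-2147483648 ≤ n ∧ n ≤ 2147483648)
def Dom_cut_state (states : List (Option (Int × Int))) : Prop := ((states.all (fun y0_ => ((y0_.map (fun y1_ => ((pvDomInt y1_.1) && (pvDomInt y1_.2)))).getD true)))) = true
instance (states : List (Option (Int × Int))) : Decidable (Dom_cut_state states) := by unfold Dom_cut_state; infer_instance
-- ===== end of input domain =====

-- B replaces A's in-place quadratic pairwise elimination by a dict-grouping pass plus a sorted
-- sweep over the distinct p-values with a running minimum of m-p; equivalence is about the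
-- RETURN value only (A additionally overwrites entries of its argument list with None; B does not mutate).

-- ===== PORT A =====
-- Python's range(i+1, N) / range(N-1) have nonnegative bounds: ported exactly as
-- List.range' (i+1) (N-(i+1)) / List.range (N-1); states[k] reads/writes are at
-- in-range indices, ported as List.getD / List.set (exact there).
def innerA (i : Nat) (m p : Int) (js : List Nat) (C : List (Option (Int × Int))) :
    List (Option (Int × Int)) :=
  match js with
  | [] => C
  | j :: js' =>
    match C.getD j none with
    | none => innerA i m p js' C
    | some (n, q) =>
      if p = q then
        (if m ≤ n then innerA i m p js' (C.set j none)
         else C.set i none)                                   -- break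
      else if p < q then
        (if m - p ≤ n - q then innerA i m p js' (C.set j none)
         else innerA i m p js' C)
      else
        (if n - q ≤ m - p then C.set i none                   -- break
         else innerA i m p js' C)

def outerA (N : Nat) (is : List Nat) (C : List (Option (Int × Int))) :
    List (Option (Int × Int)) :=
  match is with
  | [] => C
  | i :: is' =>
    match C.getD i none with
    | none => outerA N is' C
    | some (m, p) => outerA N is' (innerA i m p (List.range' (i + 1) (N - (i + 1))) C)

def cut_state (states : List (Option (Int × Int))) : List (Int × Int) :=
  let N := states.length
  (outerA N (List.range (N - 1)) states).filterMap id

-- ===== PORT B =====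
-- one pass: best[p] = lexicographically least (m-p, index) of the states with second component p
def bestStep (b : PySem.Dict Int (Int × Int)) (pr : Int × Option (Int × Int)) :
    PySem.Dict Int (Int × Int) :=
  match pr.2 with
  | none => b
  | some (m, p) =>
    match b.get? p with                         -- 'p not in best or d < best[p][0]'
    | none => b.insert p (m - p, pr.1)
    | some dv => if m - p < dv.1 then b.insert p (m - p, pr.1) else b

-- sweep body: state is (keep, cur); 'cur is None or d < cur'
def sweepStep (best : PySem.Dict Int (Int × Int)) (s : PySem.Set Int × Option Int) (p : Int) :
    PySem.Set Int × Option Int :=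
  match best.get? p with
  | none => s                                   -- unreachable (p comes from best's keys): guard only makes best[p] total
  | some dv =>
    match s.2 with
    | none => (PySem.Set.add s.1 dv.2, some dv.1)
    | some c => if dv.1 < c then (PySem.Set.add s.1 dv.2, some dv.1) else s

def cut_state_alt (states : List (Option (Int × Int))) : List (Int × Int) :=
  let best := (PySem.List.enumerate states 0).foldl bestStep PySem.Dict.empty
  let fin := (PySem.List.sorted (PySem.Dict.keys best) (fun x => x) false).foldl
      (sweepStep best) (PySem.Set.empty, none)
  (PySem.List.enumerate states 0).filterMap
    (fun pr => if PySem.Set.contains fin.1 pr.1 then pr.2 else none)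

-- ===== PRECONDITION & SPEC =====
def Spec_cut_state (states : List (Option (Int × Int))) (out : List (Int × Int)) : Prop := out = cut_state_alt states
instance (states : List (Option (Int × Int))) (out : List (Int × Int)) : Decidable (Spec_cut_state states out) := by unfold Spec_cut_state; infer_instance

-- ===== CLAIM (what is proved, stated in full; the proofs are below) =====
def Claim_equal_cut_state : Prop := ∀ (states : List (Option (Int × Int))), Dom_cut_state states → Spec_cut_state states (cut_state states)

-- ===== LEMMAS AND PROOFS =====

-- the dominance order both programs prune by: i may eliminate j
def domB (P : List (Option (Int × Int))) (i j : Nat) : Bool :=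
  match P.getD i none, P.getD j none with
  | some (m, p), some (n, q) =>
      decide ((p < q ∧ m - p ≤ n - q) ∨ (p = q ∧ (m < n ∨ (m = n ∧ i < j))))
  | _, _ => false

def dominatedB (P : List (Option (Int × Int))) (j : Nat) : Bool :=
  (List.range P.length).any (fun i => domB P i j)

-- the common value both ports are proved equal to
def specL (P : List (Option (Int × Int))) : List (Int × Int) :=
  (List.range P.length).filterMap
    (fun j => if dominatedB P j then none else P.getD j none)

-- invariant of A's working list: entries are original or killed-and-dominated
def GoodC (P C : List (Option (Int × Int))) : Prop :=
  C.length = P.length ∧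
  ∀ k, C.getD k none = P.getD k none ∨ (C.getD k none = none ∧ dominatedB P k = true)

-- per-p group minimum of (m-p, index), in lexicographic order, indices from s
def gmin (p : Int) (l : List (Option (Int × Int))) (s : Int) : Option (Int × Int) :=
  match l with
  | [] => none
  | none :: t => gmin p t (s + 1)
  | some (m, q) :: t =>
    if q = p then
      match gmin p t (s + 1) with
      | none => some (m - q, s)
      | some dv => if dv.1 < m - q then some dv else some (m - q, s)
    else gmin p t (s + 1)

-- ---- generic list facts ----
lemma getD_set_self (C : List (Option (Int × Int))) (j : Nat) :
    (C.set j none).getD j none = none := by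
  rw [List.getD_eq_getElem?_getD, List.getElem?_set]
  rcases Nat.lt_or_ge j C.length with h | h
  · rw [if_pos rfl, if_pos h]; rfl
  · rw [if_pos rfl, if_neg (by omega)]; rfl

lemma getD_set_ne (C : List (Option (Int × Int))) (j k : Nat) (h : k ≠ j) :
    (C.set j none).getD k none = C.getD k none := by
  rw [List.getD_eq_getElem?_getD, List.getElem?_set, if_neg (fun e => h e.symm),
    ← List.getD_eq_getElem?_getD]

lemma getD_set_none_pres (C : List (Option (Int × Int))) (x k : Nat)
    (h : C.getD k none = none) : (C.set x none).getD k none = none := by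
  by_cases hk : k = x
  · subst hk; exact getD_set_self C k
  · rw [getD_set_ne C x k hk]; exact h

lemma lt_length_of_getD_some (C : List (Option (Int × Int))) (k : Nat) (v : Int × Int)
    (h : C.getD k none = some v) : k < C.length := by
  by_contra hk
  rw [List.getD_eq_getElem?_getD, List.getElem?_eq_none (by omega)] at h
  simp at h

lemma countP_strict (l : List Nat) (p q : Nat → Bool)
    (himp : ∀ x ∈ l, p x = true → q x = true) (x : Nat) (hx : x ∈ l)
    (hq : q x = true) (hp : ¬ p x = true) : l.countP p < l.countP q := by
  induction l with
  | nil => simp at hx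
  | cons a t ih =>
    have hle : t.countP p ≤ t.countP q :=
      List.countP_mono_left (fun y hy => himp y (List.mem_cons_of_mem _ hy))
    rw [List.countP_cons, List.countP_cons]
    rcases List.mem_cons.mp hx with rfl | hxt
    · rw [if_pos hq, if_neg hp]
      omega
    · have hlt := ih (fun y hy h => himp y (List.mem_cons_of_mem _ hy) h) hxt
      have : (if p a = true then 1 else 0) ≤ (if q a = true then 1 else 0) := by
        by_cases hpa : p a = true
        · simp [hpa, himp a List.mem_cons_self hpa]
        · simp [hpa]
      omega

-- ---- domB facts ----
lemma domB_ent (P : List (Option (Int × Int))) (i j : Nat) (h : domB P i j = true) :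
    ∃ m p n q, P.getD i none = some (m, p) ∧ P.getD j none = some (n, q) ∧
      ((p < q ∧ m - p ≤ n - q) ∨ (p = q ∧ (m < n ∨ (m = n ∧ i < j)))) := by
  unfold domB at h
  rcases hi : P.getD i none with _ | ⟨m, p⟩ <;> rw [hi] at h
  · cases h
  · rcases hj : P.getD j none with _ | ⟨n, q⟩ <;> rw [hj] at h
    · cases h
    · exact ⟨m, p, n, q, rfl, rfl, of_decide_eq_true h⟩

lemma domB_intro (P : List (Option (Int × Int))) (i j : Nat) (m p n q : Int)
    (hi : P.getD i none = some (m, p)) (hj : P.getD j none = some (n, q))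
    (h : (p < q ∧ m - p ≤ n - q) ∨ (p = q ∧ (m < n ∨ (m = n ∧ i < j)))) :
    domB P i j = true := by
  unfold domB
  rw [hi, hj]
  exact decide_eq_true h

lemma domB_irrefl (P : List (Option (Int × Int))) (j : Nat) : domB P j j = false := by
  unfold domB
  rcases P.getD j none with _ | ⟨m, p⟩
  · rfl
  · simp only [decide_eq_false_iff_not]
    omega

lemma domB_trans (P : List (Option (Int × Int))) (a b c : Nat)
    (hab : domB P a b = true) (hbc : domB P b c = true) : domB P a c = true := by
  obtain ⟨m1, p1, n1, q1, ha, hb, h1⟩ := domB_ent P a b hab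
  obtain ⟨m2, p2, n2, q2, hb', hc, h2⟩ := domB_ent P b c hbc
  rw [hb] at hb'
  injection hb' with hb''
  obtain ⟨rfl, rfl⟩ := Prod.mk.injEq .. ▸ (Prod.mk.inj hb'')
  exact domB_intro P a c m1 p1 n2 q2 ha hc (by omega)

lemma dominatedB_of_domB (P : List (Option (Int × Int))) (i j : Nat)
    (h : domB P i j = true) : dominatedB P j = true := by
  obtain ⟨m, p, n, q, hi, hj2, _⟩ := domB_ent P i j h
  have hiN : i < P.length := lt_length_of_getD_some P i _ hi
  unfold dominatedB
  rw [List.any_eq_true]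
  exact ⟨i, List.mem_range.mpr hiN, h⟩

lemma exists_min_dom (P : List (Option (Int × Int))) (j : Nat)
    (h : dominatedB P j = true) :
    ∃ i, domB P i j = true ∧ dominatedB P i = false := by
  suffices H : ∀ n (j : Nat), (List.range P.length).countP (fun i => domB P i j) ≤ n →
      dominatedB P j = true → ∃ i, domB P i j = true ∧ dominatedB P i = false from
    H _ j le_rfl h
  intro n
  induction n with
  | zero =>
    intro j hc hd
    unfold dominatedB at hd; rw [List.any_eq_true] at hd
    obtain ⟨i, hmem, hdom⟩ := hd
    have : 0 < (List.range P.length).countP (fun i => domB P i j) :=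
      List.countP_pos_iff.mpr ⟨i, hmem, hdom⟩
    omega
  | succ n ih =>
    intro j hc hd
    unfold dominatedB at hd; rw [List.any_eq_true] at hd
    obtain ⟨i, hmem, hdom⟩ := hd
    by_cases hdi : dominatedB P i = true
    · have hlt : (List.range P.length).countP (fun x => domB P x i) <
          (List.range P.length).countP (fun x => domB P x j) := by
        apply countP_strict _ _ _ (fun x _ hx => domB_trans P x i j hx hdom) i hmem hdom
        rw [domB_irrefl]; simp
      obtain ⟨i0, h1, h2⟩ := ih i (by omega) hdi
      exact ⟨i0, domB_trans P i0 i j h1 hdom, h2⟩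
    · exact ⟨i, hdom, by simpa using hdi⟩

-- ---- A side ----
lemma length_innerA (i : Nat) (m p : Int) (js : List Nat) (C : List (Option (Int × Int))) :
    (innerA i m p js C).length = C.length := by
  induction js generalizing C with
  | nil => rfl
  | cons j js ih =>
    simp only [innerA]
    split
    · exact ih C
    · split_ifs <;> simp only [ih, List.length_set]

lemma none_innerA (i : Nat) (m p : Int) (js : List Nat) (C : List (Option (Int × Int)))
    (k : Nat) (h : C.getD k none = none) : (innerA i m p js C).getD k none = none := by
  induction js generalizing C h with
  | nil => exact h
  | cons j js ih =>
    simp only [innerA]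
    split
    · exact ih C h
    · split_ifs
      · exact ih _ (getD_set_none_pres C j k h)
      · exact getD_set_none_pres C i k h
      · exact ih _ (getD_set_none_pres C j k h)
      · exact ih C h
      · exact getD_set_none_pres C i k h
      · exact ih C h

lemma good_kill (P C : List (Option (Int × Int))) (j : Nat)
    (hG : GoodC P C) (hd : dominatedB P j = true) : GoodC P (C.set j none) := by
  obtain ⟨hl, hk⟩ := hG
  refine ⟨by rw [List.length_set]; exact hl, fun k => ?_⟩
  by_cases hkj : k = j
  · subst hkj; exact Or.inr ⟨getD_set_self C k, hd⟩
  · rw [getD_set_ne C j k hkj]; exact hk k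

lemma good_innerA (P : List (Option (Int × Int))) (i : Nat) (m p : Int) (js : List Nat)
    (C : List (Option (Int × Int))) (hG : GoodC P C)
    (hPi : P.getD i none = some (m, p)) (hCi : C.getD i none = some (m, p))
    (hjs : ∀ x ∈ js, i < x) : GoodC P (innerA i m p js C) := by
  induction js generalizing C hG hCi with
  | nil => exact hG
  | cons j js ih =>
    have hij : i < j := hjs j List.mem_cons_self
    have hjs' : ∀ x ∈ js, i < x := fun x hx => hjs x (List.mem_cons_of_mem _ hx)
    simp only [innerA]
    split
    · exact ih C hG hCi hjs'
    · next n q hC =>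
      have hPj : P.getD j none = some (n, q) := by
        rcases hG.2 j with h | ⟨h, _⟩
        · rw [← h]; exact hC
        · rw [h] at hC; cases hC
      split_ifs with h1 h2 h3 h4 h5
      · have hdj := dominatedB_of_domB P i j (domB_intro P i j m p n q hPi hPj (by omega))
        exact ih _ (good_kill P C j hG hdj)
          (by rw [getD_set_ne C j i (by omega)]; exact hCi) hjs'
      · have hdi := dominatedB_of_domB P j i (domB_intro P j i n q m p hPj hPi (by omega))
        exact good_kill P C i hG hdi
      · have hdj := dominatedB_of_domB P i j (domB_intro P i j m p n q hPi hPj (by omega))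
        exact ih _ (good_kill P C j hG hdj)
          (by rw [getD_set_ne C j i (by omega)]; exact hCi) hjs'
      · exact ih C hG hCi hjs'
      · have hdi := dominatedB_of_domB P j i (domB_intro P j i n q m p hPj hPi (by omega))
        exact good_kill P C i hG hdi
      · exact ih C hG hCi hjs'

lemma kill_innerA (P : List (Option (Int × Int))) (i : Nat) (m p : Int) (js : List Nat)
    (j : Nat) (C : List (Option (Int × Int))) (hG : GoodC P C)
    (hnd : dominatedB P i = false)
    (hPi : P.getD i none = some (m, p)) (hCi : C.getD i none = some (m, p))
    (hjs : ∀ x ∈ js, i < x) (hj : j ∈ js) (hd : domB P i j = true) :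
    (innerA i m p js C).getD j none = none := by
  obtain ⟨m1, p1, n1, q1, hPi', hPj', hprop⟩ := domB_ent P i j hd
  rw [hPi] at hPi'
  injection hPi' with e
  obtain ⟨rfl, rfl⟩ := Prod.mk.inj e
  induction js generalizing C hG hCi with
  | nil => cases hj
  | cons j0 js ih =>
    have hij0 : i < j0 := hjs j0 List.mem_cons_self
    have hjs' : ∀ x ∈ js, i < x := fun x hx => hjs x (List.mem_cons_of_mem _ hx)
    simp only [innerA]
    split
    · next hC =>
      by_cases hjj : j0 = j
      · subst hjj; exact none_innerA i m p js C j0 hC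
      · exact ih C hG hCi hjs' ((List.mem_cons.mp hj).resolve_left (fun e => hjj e.symm))
    · next n q hC =>
      have hPj0 : P.getD j0 none = some (n, q) := by
        rcases hG.2 j0 with h | ⟨h, _⟩
        · rw [← h]; exact hC
        · rw [h] at hC; cases hC
      split_ifs with h1 h2 h3 h4 h5
      · -- p=q, m≤n: kill j0
        have hdj0 := dominatedB_of_domB P i j0 (domB_intro P i j0 m p n q hPi hPj0 (by omega))
        by_cases hjj : j0 = j
        · subst hjj; exact none_innerA i m p js _ j0 (getD_set_self C j0)
        · exact ih _ (good_kill P C j0 hG hdj0)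
            (by rw [getD_set_ne C j0 i (by omega)]; exact hCi) hjs'
            ((List.mem_cons.mp hj).resolve_left (fun e => hjj e.symm))
      · -- p=q, n<m: would break, but then j0 dominates i: contradiction
        have hdi := dominatedB_of_domB P j0 i (domB_intro P j0 i n q m p hPj0 hPi (by omega))
        rw [hnd] at hdi; cases hdi
      · -- p<q with kill
        have hdj0 := dominatedB_of_domB P i j0 (domB_intro P i j0 m p n q hPi hPj0 (by omega))
        by_cases hjj : j0 = j
        · subst hjj; exact none_innerA i m p js _ j0 (getD_set_self C j0)
        · exact ih _ (good_kill P C j0 hG hdj0)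
            (by rw [getD_set_ne C j0 i (by omega)]; exact hCi) hjs'
            ((List.mem_cons.mp hj).resolve_left (fun e => hjj e.symm))
      · -- p<q, no kill: head cannot be j
        by_cases hjj : j0 = j
        · exfalso
          subst hjj
          rw [hPj0] at hPj'
          injection hPj' with e'
          obtain ⟨rfl, rfl⟩ := Prod.mk.inj e'
          omega
        · exact ih C hG hCi hjs' ((List.mem_cons.mp hj).resolve_left (fun e => hjj e.symm))
      · -- p>q break: contradiction
        have hdi := dominatedB_of_domB P j0 i (domB_intro P j0 i n q m p hPj0 hPi (by omega))
        rw [hnd] at hdi; cases hdi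
      · -- p>q, no kill: head cannot be j
        by_cases hjj : j0 = j
        · exfalso
          subst hjj
          rw [hPj0] at hPj'
          injection hPj' with e'
          obtain ⟨rfl, rfl⟩ := Prod.mk.inj e'
          omega
        · exact ih C hG hCi hjs' ((List.mem_cons.mp hj).resolve_left (fun e => hjj e.symm))

lemma break_innerA (P : List (Option (Int × Int))) (a i0 : Nat) (m p : Int) (js : List Nat)
    (C : List (Option (Int × Int))) (hG : GoodC P C)
    (hnd : dominatedB P i0 = false) (hdom : domB P i0 a = true) (hai : a < i0)
    (hjs : ∀ x ∈ js, a < x) (hi0 : i0 ∈ js)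
    (hCa : C.getD a none = some (m, p)) :
    (innerA a m p js C).getD a none = none := by
  obtain ⟨m0, p0, ma, pa, hPi0, hPa, hprop⟩ := domB_ent P i0 a hdom
  induction js generalizing C hG hCa with
  | nil => cases hi0
  | cons j0 js ih =>
    have haj0 : a < j0 := hjs j0 List.mem_cons_self
    have hjs' : ∀ x ∈ js, a < x := fun x hx => hjs x (List.mem_cons_of_mem _ hx)
    have hPa' : P.getD a none = some (m, p) := by
      rcases hG.2 a with h | ⟨h, _⟩
      · rw [← h]; exact hCa
      · rw [h] at hCa; cases hCa
    have hma : m = ma ∧ p = pa := by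
      rw [hPa'] at hPa
      injection hPa with e
      exact ⟨(Prod.mk.inj e).1, (Prod.mk.inj e).2⟩
    obtain ⟨rfl, rfl⟩ := hma
    have hCi0 : C.getD i0 none = some (m0, p0) := by
      rcases hG.2 i0 with h | ⟨h, hd2⟩
      · rw [h]; exact hPi0
      · rw [hd2] at hnd; cases hnd
    simp only [innerA]
    split
    · next hC =>
      have hne : j0 ≠ i0 := by rintro rfl; rw [hC] at hCi0; cases hCi0
      exact ih C hG hjs' ((List.mem_cons.mp hi0).resolve_left (fun e => hne e.symm)) hCa
    · next n q hC =>
      have hPj0 : P.getD j0 none = some (n, q) := by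
        rcases hG.2 j0 with h | ⟨h, _⟩
        · rw [← h]; exact hC
        · rw [h] at hC; cases hC
      split_ifs with h1 h2 h3 h4 h5
      · -- p=q, m≤n: kill j0; j0 ≠ i0 else contradiction with hprop
        have hne : j0 ≠ i0 := by
          rintro rfl
          rw [hC] at hCi0
          injection hCi0 with e
          obtain ⟨rfl, rfl⟩ := Prod.mk.inj e
          omega
        have hdj0 := dominatedB_of_domB P a j0 (domB_intro P a j0 m p n q hPa' hPj0 (by omega))
        exact ih _ (good_kill P C j0 hG hdj0) hjs'
          ((List.mem_cons.mp hi0).resolve_left (fun e => hne e.symm))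
          (by rw [getD_set_ne C j0 a (by omega)]; exact hCa)
      · exact getD_set_self C a
      · -- p<q kill j0; j0 ≠ i0 else p0 = q > p contradicts hprop
        have hne : j0 ≠ i0 := by
          rintro rfl
          rw [hC] at hCi0
          injection hCi0 with e
          obtain ⟨rfl, rfl⟩ := Prod.mk.inj e
          omega
        have hdj0 := dominatedB_of_domB P a j0 (domB_intro P a j0 m p n q hPa' hPj0 (by omega))
        exact ih _ (good_kill P C j0 hG hdj0) hjs'
          ((List.mem_cons.mp hi0).resolve_left (fun e => hne e.symm))
          (by rw [getD_set_ne C j0 a (by omega)]; exact hCa)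
      · -- p<q no kill
        have hne : j0 ≠ i0 := by
          rintro rfl
          rw [hC] at hCi0
          injection hCi0 with e
          obtain ⟨rfl, rfl⟩ := Prod.mk.inj e
          omega
        exact ih C hG hjs' ((List.mem_cons.mp hi0).resolve_left (fun e => hne e.symm)) hCa
      · exact getD_set_self C a
      · -- p>q no kill: j0 ≠ i0 (else hprop forces the break condition)
        have hne : j0 ≠ i0 := by
          rintro rfl
          rw [hC] at hCi0
          injection hCi0 with e
          obtain ⟨rfl, rfl⟩ := Prod.mk.inj e
          omega
        exact ih C hG hjs' ((List.mem_cons.mp hi0).resolve_left (fun e => hne e.symm)) hCa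

lemma length_outerA (N : Nat) (is : List Nat) (C : List (Option (Int × Int))) :
    (outerA N is C).length = C.length := by
  induction is generalizing C with
  | nil => rfl
  | cons i is ih =>
    simp only [outerA]
    split
    · exact ih C
    · rw [ih, length_innerA]

lemma none_outerA (N : Nat) (is : List Nat) (C : List (Option (Int × Int))) (k : Nat)
    (h : C.getD k none = none) : (outerA N is C).getD k none = none := by
  induction is generalizing C h with
  | nil => exact h
  | cons i is ih =>
    simp only [outerA]
    split
    · exact ih C h
    · exact ih _ (none_innerA _ _ _ _ _ _ h)

lemma good_outerA (P : List (Option (Int × Int))) (N : Nat) (is : List Nat)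
    (C : List (Option (Int × Int))) (hG : GoodC P C) : GoodC P (outerA N is C) := by
  induction is generalizing C hG with
  | nil => exact hG
  | cons i is ih =>
    simp only [outerA]
    split
    · exact ih C hG
    · next m p hC =>
      have hPi : P.getD i none = some (m, p) := by
        rcases hG.2 i with h | ⟨h, _⟩
        · rw [← h]; exact hC
        · rw [h] at hC; cases hC
      exact ih _ (good_innerA P i m p _ C hG hPi hC
        (fun x hx => by have := List.mem_range'_1.mp hx; omega))

lemma kill_outerA_lt (P : List (Option (Int × Int))) (i0 j : Nat) (is : List Nat)
    (C : List (Option (Int × Int))) (hG : GoodC P C)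
    (hnd : dominatedB P i0 = false) (hdom : domB P i0 j = true) (hij : i0 < j)
    (hi0 : i0 ∈ is) : (outerA P.length is C).getD j none = none := by
  induction is generalizing C hG with
  | nil => cases hi0
  | cons i is ih =>
    simp only [outerA]
    obtain ⟨m0, p0, n0, q0, hPi0, hPj, hprop⟩ := domB_ent P i0 j hdom
    by_cases hii : i = i0
    · subst hii
      have hCi : C.getD i none = some (m0, p0) := by
        rcases hG.2 i with h | ⟨h, hd2⟩
        · rw [h]; exact hPi0
        · rw [hd2] at hnd; cases hnd
      rw [hCi]
      have hjN : j < P.length := lt_length_of_getD_some P j _ hPj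
      have hkill := kill_innerA P i m0 p0 (List.range' (i + 1) (P.length - (i + 1))) j C hG hnd
        hPi0 hCi (fun x hx => by have := List.mem_range'_1.mp hx; omega)
        (List.mem_range'_1.mpr (by omega)) hdom
      exact none_outerA P.length is _ j hkill
    · have hi0' : i0 ∈ is := (List.mem_cons.mp hi0).resolve_left (fun e => hii e.symm)
      split
      · exact ih C hG hi0'
      · next m p hC =>
        have hPi : P.getD i none = some (m, p) := by
          rcases hG.2 i with h | ⟨h, _⟩
          · rw [← h]; exact hC
          · rw [h] at hC; cases hC
        exact ih _ (good_innerA P i m p (List.range' (i + 1) (P.length - (i + 1))) C hG hPi hC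
          (fun x hx => by have := List.mem_range'_1.mp hx; omega)) hi0'

lemma kill_outerA_gt (P : List (Option (Int × Int))) (i0 j : Nat) (is : List Nat)
    (C : List (Option (Int × Int))) (hG : GoodC P C)
    (hnd : dominatedB P i0 = false) (hdom : domB P i0 j = true) (hji : j < i0)
    (hj : j ∈ is) : (outerA P.length is C).getD j none = none := by
  induction is generalizing C hG with
  | nil => cases hj
  | cons i is ih =>
    simp only [outerA]
    obtain ⟨m0, p0, n0, q0, hPi0, hPj, hprop⟩ := domB_ent P i0 j hdom
    by_cases hij' : i = j
    · subst hij'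
      rcases hC : C.getD i none with _ | ⟨n, q⟩
      · exact none_outerA P.length is C i hC
      · have hiN : i0 < P.length := lt_length_of_getD_some P i0 _ hPi0
        have hbr := break_innerA P i i0 n q (List.range' (i + 1) (P.length - (i + 1))) C hG hnd
          hdom hji (fun x hx => by have := List.mem_range'_1.mp hx; omega)
          (List.mem_range'_1.mpr (by omega)) hC
        exact none_outerA P.length is _ i hbr
    · have hj' : j ∈ is := (List.mem_cons.mp hj).resolve_left (fun e => hij' e.symm)
      split
      · exact ih C hG hj'
      · next m p hC =>
        have hPi : P.getD i none = some (m, p) := by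
          rcases hG.2 i with h | ⟨h, _⟩
          · rw [← h]; exact hC
          · rw [h] at hC; cases hC
        exact ih _ (good_innerA P i m p (List.range' (i + 1) (P.length - (i + 1))) C hG hPi hC
          (fun x hx => by have := List.mem_range'_1.mp hx; omega)) hj'

lemma final_getD (P : List (Option (Int × Int))) (k : Nat) :
    (outerA P.length (List.range (P.length - 1)) P).getD k none =
      if dominatedB P k then none else P.getD k none := by
  have hGP : GoodC P P := ⟨rfl, fun _ => Or.inl rfl⟩
  by_cases hd : dominatedB P k = true
  · rw [if_pos hd]
    obtain ⟨i0, hdom, hndom⟩ := exists_min_dom P k hd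
    obtain ⟨m, p, n, q, hPi0, hPk, _⟩ := domB_ent P i0 k hdom
    have hkN : k < P.length := lt_length_of_getD_some P k _ hPk
    have hiN : i0 < P.length := lt_length_of_getD_some P i0 _ hPi0
    have hik : i0 ≠ k := by
      rintro rfl
      rw [domB_irrefl] at hdom
      cases hdom
    rcases Nat.lt_or_ge i0 k with h | h
    · exact kill_outerA_lt P i0 k _ P hGP hndom hdom h (List.mem_range.mpr (by omega))
    · exact kill_outerA_gt P i0 k _ P hGP hndom hdom (by omega) (List.mem_range.mpr (by omega))
  · rw [if_neg hd]
    have hG := good_outerA P P.length (List.range (P.length - 1)) P hGP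
    rcases hG.2 k with h | ⟨_, h2⟩
    · exact h
    · exact absurd h2 hd

lemma filterMap_id_getD (C : List (Option (Int × Int))) :
    C.filterMap id = (List.range C.length).filterMap (fun j => C.getD j none) := by
  induction C with
  | nil => rfl
  | cons x t ih =>
    rw [List.filterMap_cons, List.length_cons, List.range_succ_eq_map, List.filterMap_cons,
      List.filterMap_map]
    have ih' : List.filterMap (fun x => x) t
        = List.filterMap (fun k => t[k]?.getD none) (List.range t.length) := by
      simpa [List.getD_eq_getElem?_getD] using ih
    cases x <;> simp [List.getD_eq_getElem?_getD, ih']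

theorem cutA_eq_spec (P : List (Option (Int × Int))) : cut_state P = specL P := by
  unfold cut_state specL
  rw [filterMap_id_getD, length_outerA]
  exact List.filterMap_congr (fun j _ => final_getD P j)

-- ---- B side ----
def comb (x y : Option (Int × Int)) : Option (Int × Int) :=
  match x, y with
  | none, o => o
  | some dv, none => some dv
  | some dv, some dv' => if dv'.1 < dv.1 then some dv' else some dv

lemma comb_none_right (x : Option (Int × Int)) : comb x none = x := by
  cases x <;> rfl

lemma comb_assoc (x y z : Option (Int × Int)) : comb (comb x y) z = comb x (comb y z) := by
  rcases x with _ | dx <;> rcases y with _ | dy <;> rcases z with _ | dz <;>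
    simp only [comb] <;> split_ifs <;> simp only [comb] <;> split_ifs <;>
    first
    | rfl
    | omega

lemma best_foldl (l : List (Option (Int × Int))) (s : Int) (b : PySem.Dict Int (Int × Int))
    (p : Int) :
    ((PySem.List.enumerate l s).foldl bestStep b).get? p = comb (b.get? p) (gmin p l s) := by
  induction l generalizing s b with
  | nil =>
    rw [PySem.List.enumerate_nil]
    exact (comb_none_right _).symm
  | cons x t ih =>
    rcases x with _ | ⟨m0, q⟩
    · rw [PySem.List.enumerate_cons, List.foldl_cons, ih]
      rfl
    · have hg : gmin p (some (m0, q) :: t) s =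
          if q = p then comb (some (m0 - q, s)) (gmin p t (s + 1)) else gmin p t (s + 1) := by
        by_cases hqp : q = p
        · rcases hgt : gmin p t (s + 1) with _ | dv <;> simp [gmin, comb, hqp, hgt]
        · simp [gmin, hqp]
      rw [PySem.List.enumerate_cons, List.foldl_cons, ih, hg]
      rcases hb : b.get? q with _ | dv
      · have hstep : bestStep b (s, some (m0, q)) = b.insert q (m0 - q, s) := by
          simp [bestStep, hb]
        rw [hstep]
        by_cases hqp : q = p
        · subst hqp
          rw [if_pos rfl, PySem.Dict.get?_insert_self, hb]
          rfl
        · rw [if_neg hqp, PySem.Dict.get?_insert, if_neg (fun e => hqp e.symm)]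
      · by_cases hlt : m0 - q < dv.1
        · have hstep : bestStep b (s, some (m0, q)) = b.insert q (m0 - q, s) := by
            simp [bestStep, hb, hlt]
          rw [hstep]
          by_cases hqp : q = p
          · subst hqp
            rw [if_pos rfl, PySem.Dict.get?_insert_self, hb, ← comb_assoc]
            have hc : comb (some dv) (some (m0 - q, s)) = some (m0 - q, s) := by
              simp [comb, hlt]
            rw [hc]
          · rw [if_neg hqp, PySem.Dict.get?_insert, if_neg (fun e => hqp e.symm)]
        · have hstep : bestStep b (s, some (m0, q)) = b := by
            simp [bestStep, hb, hlt]
          rw [hstep]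
          by_cases hqp : q = p
          · subst hqp
            rw [if_pos rfl, hb, ← comb_assoc]
            have hc : comb (some dv) (some (m0 - q, s)) = some dv := by
              simp [comb, hlt]
            rw [hc]
          · rw [if_neg hqp]

lemma nodup_keys_best (l : List (Option (Int × Int))) (s : Int)
    (b : PySem.Dict Int (Int × Int)) (hb : b.keys.Nodup) :
    ((PySem.List.enumerate l s).foldl bestStep b).keys.Nodup := by
  induction l generalizing s b hb with
  | nil => rw [PySem.List.enumerate_nil]; exact hb
  | cons x t ih =>
    rw [PySem.List.enumerate_cons, List.foldl_cons]
    apply ih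
    rcases x with _ | ⟨m0, q⟩
    · exact hb
    · rcases hb2 : b.get? q with _ | dv
      · have hstep : bestStep b (s, some (m0, q)) = b.insert q (m0 - q, s) := by
          simp [bestStep, hb2]
        rw [hstep]; exact PySem.Dict.nodup_keys_insert _ _ _ hb
      · by_cases hlt : m0 - q < dv.1
        · have hstep : bestStep b (s, some (m0, q)) = b.insert q (m0 - q, s) := by
            simp [bestStep, hb2, hlt]
          rw [hstep]; exact PySem.Dict.nodup_keys_insert _ _ _ hb
        · have hstep : bestStep b (s, some (m0, q)) = b := by
            simp [bestStep, hb2, hlt]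
          rw [hstep]; exact hb

lemma gmin_cons_self (p m0 : Int) (t : List (Option (Int × Int))) (s : Int) :
    gmin p (some (m0, p) :: t) s = comb (some (m0 - p, s)) (gmin p t (s + 1)) := by
  rcases hgt : gmin p t (s + 1) with _ | dv <;> simp [gmin, comb, hgt]

lemma gmin_none (p : Int) (l : List (Option (Int × Int))) (s : Int)
    (h : gmin p l s = none) : ∀ (k : Nat) (m : Int), l.getD k none ≠ some (m, p) := by
  induction l generalizing s with
  | nil => intro k m; simp
  | cons x t ih =>
    intro k m
    rcases x with _ | ⟨m0, q⟩
    · have h' : gmin p t (s + 1) = none := by simpa [gmin] using h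
      cases k with
      | zero => simp
      | succ k => exact ih (s + 1) h' k m
    · by_cases hqp : q = p
      · exfalso
        subst hqp
        rw [gmin_cons_self] at h
        rcases hgt : gmin q t (s + 1) with _ | dv <;> rw [hgt] at h
        · simp [comb] at h
        · simp only [comb] at h
          split_ifs at h <;> simp at h
      · have h' : gmin p t (s + 1) = none := by simpa [gmin, hqp] using h
        cases k with
        | zero =>
          simp only [List.getD_cons_zero]
          intro he
          injection he with he'
          exact hqp (congrArg Prod.snd he')
        | succ k => exact ih (s + 1) h' k m

lemma gmin_some (p : Int) (l : List (Option (Int × Int))) (s : Int) (d i : Int)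
    (h : gmin p l s = some (d, i)) :
    (∃ k : Nat, i = s + (k : Int) ∧ l.getD k none = some (d + p, p)) ∧
    (∀ (k : Nat) (m : Int), l.getD k none = some (m, p) →
      d < m - p ∨ (d = m - p ∧ i ≤ s + (k : Int))) := by
  induction l generalizing s d i with
  | nil => cases h
  | cons x t ih =>
    rcases x with _ | ⟨m0, q⟩
    · have h' : gmin p t (s + 1) = some (d, i) := by simpa [gmin] using h
      obtain ⟨⟨k, hik, hk⟩, hmin⟩ := ih (s + 1) d i h'
      refine ⟨⟨k + 1, by push_cast at hik ⊢; omega, by simpa using hk⟩, ?_⟩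
      intro k' m' hk'
      cases k' with
      | zero => simp at hk'
      | succ k' =>
        rcases hmin k' m' (by simpa using hk') with h1 | ⟨h1, h2⟩
        · exact Or.inl h1
        · refine Or.inr ⟨h1, ?_⟩
          push_cast at h2 ⊢
          omega
    · by_cases hqp : q = p
      · subst hqp
        rw [gmin_cons_self] at h
        rcases hgt : gmin q t (s + 1) with _ | ⟨d1, i1⟩ <;> rw [hgt] at h
        · rw [comb_none_right] at h
          injection h with h'
          obtain ⟨rfl, rfl⟩ := Prod.mk.inj h'
          refine ⟨⟨0, by push_cast; ring, ?_⟩, ?_⟩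
          · simp only [List.getD_cons_zero]
            rw [show m0 - q + q = m0 from by ring]
          · intro k' m' hk'
            cases k' with
            | zero =>
              simp only [List.getD_cons_zero] at hk'
              injection hk' with h'
              obtain ⟨h2a, -⟩ := Prod.mk.inj h'
              right
              constructor
              · omega
              · push_cast; omega
            | succ k' =>
              exact absurd (by simpa using hk') (gmin_none q t (s + 1) hgt k' m')
        · by_cases hlt : d1 < m0 - q
          · have hdi : d1 = d ∧ i1 = i := by simpa [comb, hlt] using h
            obtain ⟨rfl, rfl⟩ := hdi
            obtain ⟨⟨k1, hi1, hk1⟩, hmin1⟩ := ih (s + 1) d1 i1 hgt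
            refine ⟨⟨k1 + 1, by push_cast at hi1 ⊢; omega, by simpa using hk1⟩, ?_⟩
            intro k' m' hk'
            cases k' with
            | zero =>
              simp only [List.getD_cons_zero] at hk'
              injection hk' with h'
              obtain ⟨h2a, -⟩ := Prod.mk.inj h'
              left; omega
            | succ k' =>
              rcases hmin1 k' m' (by simpa using hk') with h1 | ⟨h1, h2⟩
              · exact Or.inl h1
              · refine Or.inr ⟨h1, ?_⟩
                push_cast at h2 ⊢
                omega
          · have hdi : m0 - q = d ∧ s = i := by simpa [comb, hlt] using h
            obtain ⟨rfl, rfl⟩ := hdi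
            obtain ⟨⟨k1, hi1, hk1⟩, hmin1⟩ := ih (s + 1) d1 i1 hgt
            refine ⟨⟨0, by push_cast; ring, ?_⟩, ?_⟩
            · simp only [List.getD_cons_zero]
              rw [show m0 - q + q = m0 from by ring]
            · intro k' m' hk'
              cases k' with
              | zero =>
                simp only [List.getD_cons_zero] at hk'
                injection hk' with h'
                obtain ⟨h2a, -⟩ := Prod.mk.inj h'
                right
                constructor
                · omega
                · push_cast; omega
              | succ k' =>
                rcases hmin1 k' m' (by simpa using hk') with h1 | ⟨h1, h2⟩
                · left; omega
                · push_cast at h2 ⊢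
                  omega
      · have h' : gmin p t (s + 1) = some (d, i) := by simpa [gmin, hqp] using h
        obtain ⟨⟨k, hik, hk⟩, hmin⟩ := ih (s + 1) d i h'
        refine ⟨⟨k + 1, by push_cast at hik ⊢; omega, by simpa using hk⟩, ?_⟩
        intro k' m' hk'
        cases k' with
        | zero =>
          exfalso
          simp only [List.getD_cons_zero] at hk'
          injection hk' with he'
          exact hqp (congrArg Prod.snd he')
        | succ k' =>
          rcases hmin k' m' (by simpa using hk') with h1 | ⟨h1, h2⟩
          · exact Or.inl h1
          · refine Or.inr ⟨h1, ?_⟩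
            push_cast at h2 ⊢
            omega

lemma sweep_mem (best : PySem.Dict Int (Int × Int)) (ks : List Int)
    (hks : ks.Pairwise (· < ·)) (hmem : ∀ x ∈ ks, (best.get? x).isSome)
    (acc : PySem.Set Int) (cur : Option Int) (i : Int) :
    (i ∈ (ks.foldl (sweepStep best) (acc, cur)).1 ↔
      i ∈ acc ∨ ∃ x ∈ ks, ∃ d, best.get? x = some (d, i) ∧
        (∀ c, cur = some c → d < c) ∧
        (∀ y ∈ ks, y < x → ∀ d' i', best.get? y = some (d', i') → d < d')) := by
  induction ks generalizing acc cur with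
  | nil => simp
  | cons p0 t ih =>
    have hmem0 := hmem p0 List.mem_cons_self
    obtain ⟨dv0, hb0⟩ : ∃ dv, best.get? p0 = some dv := by
      rcases hx : best.get? p0 with _ | dv
      · rw [hx] at hmem0; cases hmem0
      · exact ⟨dv, rfl⟩
    have hpt : ∀ y ∈ t, p0 < y := (List.pairwise_cons.mp hks).1
    have hkst : t.Pairwise (· < ·) := (List.pairwise_cons.mp hks).2
    have hmemt : ∀ x ∈ t, (best.get? x).isSome := fun x hx => hmem x (List.mem_cons_of_mem _ hx)
    rw [List.foldl_cons]
    rcases cur with _ | c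
    · have hstep : sweepStep best (acc, none) p0 = (PySem.Set.add acc dv0.2, some dv0.1) := by
        simp [sweepStep, hb0]
      rw [hstep, ih hkst hmemt (PySem.Set.add acc dv0.2) (some dv0.1)]
      constructor
      · rintro (h | ⟨x, hxt, d, hbx, hcur, hminq⟩)
        · rcases (PySem.Set.mem_add _ _ _).mp h with h | h2
          · exact Or.inl h
          · right
            refine ⟨p0, List.mem_cons_self, dv0.1, by rw [h2, hb0], ?_, ?_⟩
            · intro c hc; cases hc
            intro y hy hylt d' i' hby
            rcases List.mem_cons.mp hy with rfl | hy'
            · omega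
            · exact absurd hylt (by have := hpt y hy'; omega)
        · right
          refine ⟨x, List.mem_cons_of_mem _ hxt, d, hbx, ?_, ?_⟩
          · intro c hc; cases hc
          intro y hy hylt d' i' hby
          rcases List.mem_cons.mp hy with rfl | hy'
          · rw [hb0] at hby
            injection hby with hby'
            obtain ⟨h1, -⟩ := Prod.mk.inj hby'
            have hdc := hcur dv0.1 rfl
            omega
          · exact hminq y hy' hylt d' i' hby
      · rintro (h | ⟨x, hx, d, hbx, -, hminq⟩)
        · exact Or.inl ((PySem.Set.mem_add _ _ _).mpr (Or.inl h))
        · rcases List.mem_cons.mp hx with rfl | hxt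
          · left
            rw [hb0] at hbx
            injection hbx with hbx'
            obtain ⟨-, h2⟩ := Prod.mk.inj hbx'
            exact (PySem.Set.mem_add _ _ _).mpr (Or.inr h2.symm)
          · right
            refine ⟨x, hxt, d, hbx, ?_, ?_⟩
            · intro c hc
              injection hc with hc'
              have := hminq p0 List.mem_cons_self (hpt x hxt) dv0.1 dv0.2 hb0
              omega
            · intro y hy hylt d' i' hby
              exact hminq y (List.mem_cons_of_mem _ hy) hylt d' i' hby
    · by_cases hlt : dv0.1 < c
      · have hstep : sweepStep best (acc, some c) p0 = (PySem.Set.add acc dv0.2, some dv0.1) := by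
          simp [sweepStep, hb0, hlt]
        rw [hstep, ih hkst hmemt (PySem.Set.add acc dv0.2) (some dv0.1)]
        constructor
        · rintro (h | ⟨x, hxt, d, hbx, hcur, hminq⟩)
          · rcases (PySem.Set.mem_add _ _ _).mp h with h | h2
            · exact Or.inl h
            · right
              refine ⟨p0, List.mem_cons_self, dv0.1, by rw [h2, hb0], ?_, ?_⟩
              · intro c' hc'; injection hc' with e; omega
              intro y hy hylt d' i' hby
              rcases List.mem_cons.mp hy with rfl | hy'
              · omega
              · exact absurd hylt (by have := hpt y hy'; omega)
          · right
            have hdc := hcur dv0.1 rfl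
            refine ⟨x, List.mem_cons_of_mem _ hxt, d, hbx, ?_, ?_⟩
            · intro c' hc'; injection hc' with e; omega
            intro y hy hylt d' i' hby
            rcases List.mem_cons.mp hy with rfl | hy'
            · rw [hb0] at hby
              injection hby with hby'
              obtain ⟨h1, -⟩ := Prod.mk.inj hby'
              omega
            · exact hminq y hy' hylt d' i' hby
        · rintro (h | ⟨x, hx, d, hbx, hcur, hminq⟩)
          · exact Or.inl ((PySem.Set.mem_add _ _ _).mpr (Or.inl h))
          · rcases List.mem_cons.mp hx with rfl | hxt
            · left
              rw [hb0] at hbx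
              injection hbx with hbx'
              obtain ⟨-, h2⟩ := Prod.mk.inj hbx'
              exact (PySem.Set.mem_add _ _ _).mpr (Or.inr h2.symm)
            · right
              refine ⟨x, hxt, d, hbx, ?_, ?_⟩
              · intro c' hc'
                injection hc' with e
                have := hminq p0 List.mem_cons_self (hpt x hxt) dv0.1 dv0.2 hb0
                omega
              · intro y hy hylt d' i' hby
                exact hminq y (List.mem_cons_of_mem _ hy) hylt d' i' hby
      · have hstep : sweepStep best (acc, some c) p0 = (acc, some c) := by
          simp [sweepStep, hb0, hlt]
        rw [hstep, ih hkst hmemt acc (some c)]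
        constructor
        · rintro (h | ⟨x, hxt, d, hbx, hcur, hminq⟩)
          · exact Or.inl h
          · right
            refine ⟨x, List.mem_cons_of_mem _ hxt, d, hbx, hcur, ?_⟩
            intro y hy hylt d' i' hby
            rcases List.mem_cons.mp hy with rfl | hy'
            · rw [hb0] at hby
              injection hby with hby'
              obtain ⟨h1, -⟩ := Prod.mk.inj hby'
              have := hcur c rfl
              omega
            · exact hminq y hy' hylt d' i' hby
        · rintro (h | ⟨x, hx, d, hbx, hcur, hminq⟩)
          · exact Or.inl h
          · rcases List.mem_cons.mp hx with rfl | hxt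
            · exfalso
              rw [hb0] at hbx
              injection hbx with hbx'
              obtain ⟨h1, -⟩ := Prod.mk.inj hbx'
              have := hcur c rfl
              omega
            · right
              refine ⟨x, hxt, d, hbx, hcur, ?_⟩
              intro y hy hylt d' i' hby
              exact hminq y (List.mem_cons_of_mem _ hy) hylt d' i' hby

lemma filterMap_enumerate (l : List (Option (Int × Int))) (c : Int → Bool) (s : Int) :
    (PySem.List.enumerate l s).filterMap (fun pr => if c pr.1 then pr.2 else none) =
      (List.range l.length).filterMap
        (fun (k : Nat) => if c (s + (k : Int)) then l.getD k none else none) := by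
  induction l generalizing s with
  | nil => rfl
  | cons x t ih =>
    rw [PySem.List.enumerate_cons, List.filterMap_cons, List.length_cons, List.range_succ_eq_map,
      List.filterMap_cons, List.filterMap_map]
    have hcomp : List.filterMap
        ((fun (k : Nat) => if c (s + (k : Int)) then (x :: t).getD k none else none) ∘ Nat.succ)
          (List.range t.length)
        = List.filterMap
            (fun (k : Nat) => if c ((s + 1) + (k : Int)) then t.getD k none else none)
            (List.range t.length) := by
      apply List.filterMap_congr
      intro a _
      simp only [Function.comp_apply, List.getD_cons_succ]
      have hs : s + ((a + 1 : Nat) : Int) = (s + 1) + (a : Int) := by push_cast; ring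
      rw [hs]
    rw [hcomp, ← ih (s + 1)]
    simp only [List.getD_cons_zero, Nat.cast_zero, add_zero]

theorem cutB_eq_spec (P : List (Option (Int × Int))) : cut_state_alt P = specL P := by
  simp only [cut_state_alt]
  set best := (PySem.List.enumerate P 0).foldl bestStep PySem.Dict.empty with hbest
  set ks := PySem.List.sorted (PySem.Dict.keys best) (fun x => x) false with hks
  set fin := ks.foldl (sweepStep best) (PySem.Set.empty, none) with hfin
  have hget : ∀ p, best.get? p = gmin p P 0 := by
    intro p
    rw [hbest, best_foldl, PySem.Dict.get?_empty]
    rfl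
  have hnk : (PySem.Dict.keys best).Nodup := by
    rw [hbest]
    exact nodup_keys_best P 0 _ PySem.Dict.nodup_keys_empty
  have hmemks : ∀ p : Int, p ∈ ks ↔ (gmin p P 0).isSome = true := by
    intro p
    rw [hks, PySem.List.mem_sorted]
    constructor
    · intro hp
      rcases hg : gmin p P 0 with _ | dv
      · exfalso
        have hnone : best.get? p = none := by rw [hget p, hg]
        exact absurd hp ((PySem.Dict.get?_eq_none_iff_not_mem_keys _ _).mp hnone)
      · rfl
    · intro hp
      by_contra hnp
      have hnone : best.get? p = none := (PySem.Dict.get?_eq_none_iff_not_mem_keys _ _).mpr hnp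
      rw [hget p] at hnone
      rw [hnone] at hp
      cases hp
  have hpair : ks.Pairwise (· < ·) := by
    have h1 : ks.Pairwise (fun a b => (fun x => x) a ≤ (fun x => x) b) :=
      PySem.List.sorted_pairwise (PySem.Dict.keys best) (fun x => x)
    have h2 : ks.Nodup :=
      ((PySem.List.sorted_perm (PySem.Dict.keys best) (fun x => x) false).nodup_iff).mpr hnk
    exact (h1.and h2).imp (fun h => lt_of_le_of_ne h.1 h.2)
  have hmemiff := fun i => sweep_mem best ks hpair
    (fun x hx => by rw [hget x]; exact (hmemks x).mp hx) PySem.Set.empty none i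
  have hkeep : ∀ k : Nat, ((k : Int) ∈ fin.1 ↔
      ((P.getD k none).isSome = true ∧ dominatedB P k = false)) := by
    intro k
    rw [hfin, hmemiff (k : Int)]
    simp only [show (PySem.Set.empty : PySem.Set Int) = [] from rfl, List.not_mem_nil, false_or]
    constructor
    · rintro ⟨x, hxks, d, hbx, -, hminq⟩
      rw [hget x] at hbx
      obtain ⟨⟨k0, hik, hk0⟩, hmin⟩ := gmin_some x P 0 d (k : Int) hbx
      have hkk0 : k = k0 := by push_cast at hik; omega
      subst hkk0
      constructor
      · rw [hk0]; rfl
      · by_contra hdom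
        have hdom' : dominatedB P k = true := by simpa using hdom
        unfold dominatedB at hdom'
        rw [List.any_eq_true] at hdom'
        obtain ⟨a, hamem, ha⟩ := hdom'
        obtain ⟨m', p', n1, q1, hPa, hPk, hprop⟩ := domB_ent P a k ha
        rw [hk0] at hPk
        injection hPk with e
        obtain ⟨he1, he2⟩ := Prod.mk.inj e
        subst he2
        rcases hprop with ⟨hlt, hle⟩ | ⟨heq, hrest⟩
        · rcases hga : gmin p' P 0 with _ | dv'
          · exact gmin_none p' P 0 hga a m' hPa
          · have hp'ks : p' ∈ ks := (hmemks p').mpr (by rw [hga]; rfl)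
            have hdlt := hminq p' hp'ks hlt dv'.1 dv'.2 (by rw [hget p', hga])
            obtain ⟨-, hmin'⟩ := gmin_some p' P 0 dv'.1 dv'.2 hga
            rcases hmin' a m' hPa with h1 | ⟨h1, -⟩ <;> omega
        · subst heq
          rcases hmin a m' hPa with h1 | ⟨h1, h2⟩
          · omega
          · push_cast at h2
            omega
    · rintro ⟨hsome, hnd⟩
      rcases hPk : P.getD k none with _ | ⟨m, p⟩
      · rw [hPk] at hsome; cases hsome
      · rcases hg : gmin p P 0 with _ | ⟨d0, i0⟩
        · exact absurd hPk (gmin_none p P 0 hg k m)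
        · obtain ⟨⟨k0, hi0, hk0⟩, hmin⟩ := gmin_some p P 0 d0 i0 hg
          have hkd : k0 = k ∧ d0 = m - p := by
            by_cases hkk : k0 = k
            · subst hkk
              rw [hk0] at hPk
              injection hPk with e
              exact ⟨rfl, by have := (Prod.mk.inj e).1; omega⟩
            · exfalso
              have hdomk : domB P k0 k = true := by
                apply domB_intro P k0 k (d0 + p) p m p hk0 hPk
                rcases hmin k m hPk with h1 | ⟨h1, h2⟩
                · right; exact ⟨rfl, Or.inl (by omega)⟩
                · right
                  refine ⟨rfl, Or.inr ⟨by omega, ?_⟩⟩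
                  push_cast at hi0 h2
                  omega
              have hdd := dominatedB_of_domB P k0 k hdomk
              rw [hnd] at hdd; cases hdd
          obtain ⟨he1, he2⟩ := hkd
          subst he1
          refine ⟨p, (hmemks p).mpr (by rw [hg]; rfl), d0, ?_, ?_, ?_⟩
          · rw [hget p, hg, show i0 = ((k0 : Nat) : Int) from by push_cast at hi0; omega]
          · intro c hc; cases hc
          · intro y hy hylt d' i' hby
            rw [hget y] at hby
            obtain ⟨⟨k', hi', hk'⟩, -⟩ := gmin_some y P 0 d' i' hby
            by_contra hled
            have hdom : domB P k' k0 = true := by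
              apply domB_intro P k' k0 (d' + y) y (d0 + p) p hk' hk0
              left
              constructor
              · exact hylt
              · omega
            have hdd := dominatedB_of_domB P k' k0 hdom
            rw [hnd] at hdd; cases hdd
  rw [filterMap_enumerate P (PySem.Set.contains fin.1) 0]
  unfold specL
  apply List.filterMap_congr
  intro k _
  have h0 : (0 : Int) + (k : Int) = (k : Int) := by ring
  rw [h0]
  rcases hPk : P.getD k none with _ | v
  · by_cases hd : dominatedB P k = true <;> simp [hd, hPk] <;> intro h <;> rfl
  · have hiff := hkeep k
    rw [hPk] at hiff
    by_cases hd : dominatedB P k = true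
    · have hnm : ¬ ((k : Int) ∈ fin.1) := by
        rw [hiff]
        simp [hd]
      simp [hd, hnm]
    · have hm : (k : Int) ∈ fin.1 := hiff.mpr ⟨rfl, by simpa using hd⟩
      simp [hd, hm]

-- ===== VERDICT (by name: the statement is the Claim_ definition above) =====
theorem cut_state_spec : Claim_equal_cut_state := by
  intro states _
  unfold Spec_cut_state
  rw [cutA_eq_spec, cutB_eq_spec]
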